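-- pv_equiv track=rewrite | github.com/FutureMaker0/Programmers-Lv.0 | 공 던지기.py | solution
-- ===== SOURCE A (Python) =====
-- from collections import deque
--
-- def solution(numbers, k):
--     answer = 0
--     q = deque(numbers)
--
--     if len(numbers) % 2 == 0:
--         for _ in range(k-1):
--             q.rotate(-2)
--         answer = q[0]
--
--     else:
--         for _ in range(k-1):
--             q.rotate(-2)
--         answer = q[0]
--
--     return answer
-- ===== SOURCE B (Python) =====
-- def solution(numbers, k):
--     return numbers[(2 * max(k - 1, 0)) % len(numbers)]
-- ===== Notes on version B (the rewrite author's own statement) =====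
-- stated objective: simpler
-- what changed: Replaced A's loop of k-1 deque rotations (and its duplicated even/odd branches) by a single direct index numbers[(2*max(k-1,0)) % len(numbers)].
import Mathlib
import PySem

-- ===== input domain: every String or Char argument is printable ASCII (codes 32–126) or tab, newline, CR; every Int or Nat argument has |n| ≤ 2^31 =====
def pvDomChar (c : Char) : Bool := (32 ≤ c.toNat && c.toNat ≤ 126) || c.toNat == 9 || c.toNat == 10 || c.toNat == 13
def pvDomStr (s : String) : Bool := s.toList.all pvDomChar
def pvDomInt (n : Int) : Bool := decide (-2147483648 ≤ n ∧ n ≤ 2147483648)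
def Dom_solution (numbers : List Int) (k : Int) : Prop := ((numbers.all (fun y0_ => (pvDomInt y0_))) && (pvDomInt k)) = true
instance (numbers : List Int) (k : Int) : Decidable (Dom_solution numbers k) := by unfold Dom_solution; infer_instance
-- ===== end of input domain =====

-- ===== PORT A =====
-- B replaces A's O(k) loop of deque rotations by one direct index; A raises on empty numbers, excluded by Pre_.
def solution (numbers : List Int) (k : Int) : Int :=
  let q :=
    if numbers.length % 2 == 0 then
      (List.range (k - 1).toNat).foldl (fun q _ => q.drop 2 ++ q.take 2) numbers
    else
      (List.range (k - 1).toNat).foldl (fun q _ => q.drop 2 ++ q.take 2) numbers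
  (PySem.List.pyGet? q 0).getD 0

-- ===== PORT B =====
def solution_alt (numbers : List Int) (k : Int) : Int :=
  (PySem.List.pyGet? numbers (PySem.Int.mod (2 * max (k - 1) 0) numbers.length)).getD 0

-- ===== PRECONDITION & SPEC =====
-- Pre_ excludes only the empty list, on which A raises IndexError (q[0]).
def Pre_solution (numbers : List Int) (k : Int) : Prop := numbers ≠ []
instance (numbers : List Int) (k : Int) : Decidable (Pre_solution numbers k) := by unfold Pre_solution; infer_instance
def pvWitness_solution : List Int × Int := ([3, 1, 4], 5)
def Spec_solution (numbers : List Int) (k : Int) (out : Int) : Prop := out = solution_alt numbers k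
instance (numbers : List Int) (k : Int) (out : Int) : Decidable (Spec_solution numbers k out) := by unfold Spec_solution; infer_instance

-- ===== CLAIM (what is proved, stated in full; the proofs are below) =====
def Claim_equal_solution : Prop := ∀ (numbers : List Int) (k : Int), Dom_solution numbers k → Pre_solution numbers k → Spec_solution numbers k (solution numbers k)

-- ===== LEMMAS AND PROOFS =====

-- one step of A's loop is a rotation by 2
theorem rot2_eq_rotate (l : List Int) : l.drop 2 ++ l.take 2 = l.rotate 2 := by
  rcases l with _ | ⟨a, _ | ⟨b, _ | ⟨c, t⟩⟩⟩ <;> simp [List.rotate]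
  have h2 : 2 % (t.length + 3) = 2 := Nat.mod_eq_of_lt (by omega)
  simp [h2]

theorem foldl_rot_eq_rotate (m : Nat) (l : List Int) :
    (List.range m).foldl (fun q _ => q.drop 2 ++ q.take 2) l = l.rotate (2 * m) := by
  induction m with
  | zero => simp
  | succ n ih =>
      rw [List.range_succ, List.foldl_append, ih]
      simp [rot2_eq_rotate, List.rotate_rotate]
      ring_nf

theorem solution_spec' (numbers : List Int) (k : Int) (h : numbers ≠ []) :
    solution numbers k = solution_alt numbers k := by
  have hn : 0 < numbers.length := List.length_pos_iff.mpr h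
  unfold solution solution_alt
  have hq : ∀ b : Bool,
      (if b then (List.range (k - 1).toNat).foldl (fun q _ => q.drop 2 ++ q.take 2) numbers
       else (List.range (k - 1).toNat).foldl (fun q _ => q.drop 2 ++ q.take 2) numbers)
      = numbers.rotate (2 * (k - 1).toNat) := by
    intro b; cases b <;> simp [foldl_rot_eq_rotate]
  rw [hq]
  show (PySem.List.pyGet? (numbers.rotate (2 * (k - 1).toNat)) 0).getD 0 = _
  -- index on the B side
  have hmax : max (k - 1) 0 = ((k - 1).toNat : Int) := by omega
  have hmod : PySem.Int.mod (2 * max (k - 1) 0) numbers.length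
      = ((2 * (k - 1).toNat % numbers.length : Nat) : Int) := by
    rw [hmax]
    have : (2 : Int) * ((k - 1).toNat : Int) = ((2 * (k - 1).toNat : Nat) : Int) := by push_cast; ring
    rw [this, PySem.Int.mod_natCast]
  rw [hmod, PySem.List.pyGet?_natCast]
  -- head of the rotated list
  rw [PySem.List.pyGet?_zero]
  have hlen : (numbers.rotate (2 * (k - 1).toNat)).length = numbers.length := by simp
  have h0 : 0 < (numbers.rotate (2 * (k - 1).toNat)).length := by omega
  rw [List.getElem?_eq_getElem h0, List.getElem_rotate]
  rw [List.getElem?_eq_getElem (by simpa using Nat.mod_lt _ hn)]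
  simp

-- ===== VERDICT (by name: the statement is the Claim_ definition above) =====
theorem solution_spec : Claim_equal_solution := by
  intro numbers k _ hpre
  unfold Spec_solution
  exact solution_spec' numbers k hpre
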